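-- pv_equiv track=rewrite | github.com/xpessoles/Informatique | S2_Cours/07_PilesFiles/pile_file.py | hauteur
-- ===== SOURCE A (Python) =====
-- from collections import deque
--
-- def hauteur(pile) -> int :
--     pile_tmp = deque()
--     h = 0
--     while pile :
--         pile_tmp.append(pile.pop())
--         h = h+1
--     while pile_tmp :
--         pile.append(pile_tmp.pop())
--     return h
-- ===== SOURCE B (Python) =====
-- def hauteur(pile) -> int:
--     h = 0
--     for _ in pile:
--         h = h + 1
--     return h
-- ===== Notes on version B (the rewrite author's own statement) =====
-- stated objective: simpler
-- what changed: B counts in one non-destructive pass over the deque with a counter, instead of A's two loops that drain the stack into a temporary deque and then restore it.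
import Mathlib
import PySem

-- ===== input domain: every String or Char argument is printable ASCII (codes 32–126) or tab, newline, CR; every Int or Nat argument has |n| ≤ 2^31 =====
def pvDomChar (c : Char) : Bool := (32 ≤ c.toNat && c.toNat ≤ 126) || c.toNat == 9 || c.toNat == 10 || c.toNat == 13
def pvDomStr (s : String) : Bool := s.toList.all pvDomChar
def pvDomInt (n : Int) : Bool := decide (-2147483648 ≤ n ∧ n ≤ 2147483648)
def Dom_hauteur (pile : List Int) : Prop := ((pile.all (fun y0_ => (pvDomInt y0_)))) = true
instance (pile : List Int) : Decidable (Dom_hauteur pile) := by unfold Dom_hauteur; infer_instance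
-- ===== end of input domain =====

-- B counts in one non-destructive pass with a counter instead of A's drain-into-temp-then-restore;
-- A mutates `pile` and restores it (net effect: unchanged), B never mutates; the claim is about the RETURN value only.

-- ===== PORT A =====
-- first while loop: pop from the end of pile into pile_tmp, counting
def hauteurLoop1 : List Int → List Int → Int → List Int × List Int × Int
  | [], pile_tmp, h => ([], pile_tmp, h)
  | x :: xs, pile_tmp, h =>
      hauteurLoop1 (x :: xs).dropLast (pile_tmp ++ [(x :: xs).getLast!]) (h + 1)
termination_by pile _ _ => pile.length
decreasing_by simp [List.length_dropLast]

-- second while loop: pop pile_tmp back onto pile (restores pile; result unused by the return)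
def hauteurLoop2 : List Int → List Int → List Int × List Int
  | pile, [] => (pile, [])
  | pile, y :: ys =>
      hauteurLoop2 (pile ++ [(y :: ys).getLast!]) (y :: ys).dropLast
termination_by _ pile_tmp => pile_tmp.length
decreasing_by simp [List.length_dropLast]

def hauteur (pile : List Int) : Int :=
  let r1 := hauteurLoop1 pile [] 0
  let _ := hauteurLoop2 r1.1 r1.2.1
  r1.2.2

-- ===== PORT B =====
def hauteur_alt (pile : List Int) : Int :=
  pile.foldl (fun h _ => h + 1) 0

-- ===== PRECONDITION & SPEC =====
def Spec_hauteur (pile : List Int) (out : Int) : Prop := out = hauteur_alt pile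
instance (pile : List Int) (out : Int) : Decidable (Spec_hauteur pile out) := by unfold Spec_hauteur; infer_instance

-- ===== CLAIM (what is proved, stated in full; the proofs are below) =====
def Claim_equal_hauteur : Prop := ∀ (pile : List Int), Dom_hauteur pile → Spec_hauteur pile (hauteur pile)

-- ===== LEMMAS AND PROOFS =====
lemma hauteurLoop1_count : ∀ (n : Nat) (pile tmp : List Int) (h : Int), pile.length = n →
    (hauteurLoop1 pile tmp h).2.2 = h + pile.length := by
  intro n
  induction n with
  | zero =>
      intro pile tmp h hn
      have : pile = [] := List.eq_nil_of_length_eq_zero hn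
      subst this; simp [hauteurLoop1]
  | succ k ih =>
      intro pile tmp h hn
      match pile with
      | x :: xs =>
          rw [hauteurLoop1]
          simp only [List.length_cons] at hn
          have hn' : xs.length = k := by omega
          have hlen : (x :: xs).dropLast.length = k := by
            simp [List.length_dropLast, hn']
          rw [ih _ _ _ hlen, hlen]
          simp
          omega

lemma foldl_count_shift : ∀ (l : List Int) (a : Int), l.foldl (fun h _ => h + 1) a = a + l.length := by
  intro l
  induction l with
  | nil => simp
  | cons y ys ih2 => intro a; simp [List.foldl_cons, ih2]; omega

lemma hauteur_alt_count (pile : List Int) : hauteur_alt pile = pile.length := by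
  unfold hauteur_alt
  rw [foldl_count_shift]
  simp

-- ===== VERDICT (by name: the statement is the Claim_ definition above) =====
theorem hauteur_spec : Claim_equal_hauteur := by
  intro pile _
  unfold Spec_hauteur hauteur
  rw [hauteur_alt_count, hauteurLoop1_count pile.length pile [] 0 rfl]
  simp
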